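-- pv_equiv track=rewrite | github.com/Medhansh19/IEEE_BITS | q5.py | sum_arr
-- ===== SOURCE A (Python) =====
-- def max_sum(arr):
--     # [index, value]
--     min_positive = [0, max(arr)]
--     max_negative = [0, min(arr)]
--     for index, ele in enumerate(arr):
--         if (index % 2 == 0):
--             if ele < min_positive[1]:
--                 min_positive = [index, ele]
--
--         else:
--             if ele > max_negative[1]:
--                 max_negative = [index, ele]
--
--     # switch the max_positive and max_negative element
--     arr[min_positive[0]], arr[max_negative[0]] = arr[max_negative[0]], arr[min_positive[0]]
--     return arr
--
-- def sum_arr(arr):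
--     arr = max_sum(arr)
--     s = 0
--     for index, ele in enumerate(arr):
--         if (index % 2 == 0):
--             s += ele
--         else:
--             s -= ele
--
--     return s
-- ===== SOURCE B (Python) =====
-- def sum_arr(arr):
--     # one pass: track min over even indices / max over odd indices (same inits as
--     # the original, so empty input still raises ValueError) and the alternating
--     # sum; then do the same in-place swap and return base plus a closed-form delta
--     # instead of rescanning the swapped list.
--     mp_i, mp_v = 0, max(arr)
--     mn_i, mn_v = 0, min(arr)
--     base = 0
--     for index, ele in enumerate(arr):
--         if index % 2 == 0:
--             base += ele
--             if ele < mp_v: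
--                 mp_i, mp_v = index, ele
--         else:
--             base -= ele
--             if ele > mn_v:
--                 mn_i, mn_v = index, ele
--     arr[mp_i], arr[mn_i] = arr[mn_i], arr[mp_i]  # same observable mutation as A
--     return base if mn_i == 0 else base + 2 * (mn_v - mp_v)
-- ===== Notes on version B (the rewrite author's own statement) =====
-- stated objective: alternative
-- what changed: One pass instead of two: the alternating sum is accumulated together with the even-index min / odd-index max, and the post-swap rescan is replaced by a closed-form delta (0 or 2*(mn_v - mp_v)).
-- outside the precondition, e.g. on sum_arr([]): A raises ValueError, B raises ValueError
import Mathlib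
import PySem

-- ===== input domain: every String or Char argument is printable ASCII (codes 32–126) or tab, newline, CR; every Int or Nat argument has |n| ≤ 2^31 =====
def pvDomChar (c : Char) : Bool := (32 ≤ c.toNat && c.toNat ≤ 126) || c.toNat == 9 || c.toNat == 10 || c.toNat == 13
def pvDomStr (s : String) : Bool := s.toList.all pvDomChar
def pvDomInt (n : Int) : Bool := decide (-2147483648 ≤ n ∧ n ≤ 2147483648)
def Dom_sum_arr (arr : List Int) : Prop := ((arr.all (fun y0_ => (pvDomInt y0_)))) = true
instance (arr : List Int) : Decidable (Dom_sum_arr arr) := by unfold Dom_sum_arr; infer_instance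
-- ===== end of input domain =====

-- B folds min-even / max-odd / alternating sum in ONE pass and replaces A's post-swap
-- rescan by a closed-form delta; equivalence is about the RETURN value only (A mutates
-- its argument in place; Python B performs the same mutation, the ports do not model it).


-- ===== PORT A =====
-- step of max_sum's loop: state ((min_positive index, value), (max_negative index, value))
def pvStepA (st : (Int × Int) × (Int × Int)) (p : Int × Int) : (Int × Int) × (Int × Int) :=
  if PySem.Int.mod p.1 2 == 0 then
    if p.2 < st.1.2 then ((p.1, p.2), st.2) else st
  else
    if p.2 > st.2.2 then (st.1, (p.1, p.2)) else st

-- step of sum_arr's second loop (s += ele / s -= ele)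
def pvAlt2 (s : Int) (p : Int × Int) : Int :=
  if PySem.Int.mod p.1 2 == 0 then s + p.2 else s - p.2

def sum_arr (arr : List Int) : Int :=
  match PySem.List.max? arr (fun x => x), PySem.List.min? arr (fun x => x) with
  | some mx, some mn =>
    let st := (PySem.List.enumerate arr).foldl pvStepA ((0, mx), (0, mn))
    let i := st.1.1
    let j := st.2.1
    let vi := PySem.List.pyGetD arr i 0
    let vj := PySem.List.pyGetD arr j 0
    -- arr[i], arr[j] = arr[j], arr[i]; i, j are produced by enumerate (or stay 0),
    -- hence nonnegative and < len arr, so .toNat/List.set is exact here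
    let arr2 := (arr.set i.toNat vj).set j.toNat vi
    (PySem.List.enumerate arr2).foldl pvAlt2 0
  | _, _ => 0   -- unreachable under Pre_: max()/min() of an empty list raise ValueError

-- ===== PORT B =====
-- single-pass step: ((mp_i, mp_v), (mn_i, mn_v), base)
def pvStepB (st : (Int × Int) × (Int × Int) × Int) (p : Int × Int) :
    (Int × Int) × (Int × Int) × Int :=
  if PySem.Int.mod p.1 2 == 0 then
    ((if p.2 < st.1.2 then (p.1, p.2) else st.1), st.2.1, st.2.2 + p.2)
  else
    (st.1, (if p.2 > st.2.1.2 then (p.1, p.2) else st.2.1), st.2.2 - p.2)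

def sum_arr_alt (arr : List Int) : Int :=
  match PySem.List.max? arr (fun x => x) with
  | none => 0   -- unreachable under Pre_
  | some mx =>
    match PySem.List.min? arr (fun x => x) with
    | none => 0
    | some mn =>
      let st := (PySem.List.enumerate arr).foldl pvStepB ((0, mx), (0, mn), 0)
      -- (Source B's in-place swap only mutates the argument; the return value ignores it)
      if st.2.1.1 == 0 then st.2.2 else st.2.2 + 2 * (st.2.1.2 - st.1.2)

-- ===== PRECONDITION & SPEC =====
-- A raises ValueError (max() of empty sequence) on []; excluded.
def Pre_sum_arr (arr : List Int) : Prop := arr ≠ []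
instance (arr : List Int) : Decidable (Pre_sum_arr arr) := by unfold Pre_sum_arr; infer_instance
def pvWitness_sum_arr : List Int := [3, -1, 2]

def Spec_sum_arr (arr : List Int) (out : Int) : Prop := out = sum_arr_alt arr
instance (arr : List Int) (out : Int) : Decidable (Spec_sum_arr arr out) := by unfold Spec_sum_arr; infer_instance

-- ===== CLAIM (what is proved, stated in full; the proofs are below) =====
def Claim_equal_sum_arr : Prop := ∀ (arr : List Int), Dom_sum_arr arr → Pre_sum_arr arr → Spec_sum_arr arr (sum_arr arr)

-- ===== LEMMAS AND PROOFS =====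

-- alternating sum a0 - a1 + a2 - … as a one-step recursion
def pvAsum : List Int → Int
  | [] => 0
  | a :: t => a - pvAsum t

theorem pv_foldl_inv {α σ : Type} (P : σ → Prop) (f : σ → α → σ) :
    ∀ (ps : List α) (st : σ), P st → (∀ st x, x ∈ ps → P st → P (f st x)) →
      P (ps.foldl f st) := by
  intro ps
  induction ps with
  | nil => intro st h _; exact h
  | cons x t ih =>
    intro st h hstep
    exact ih _ (hstep st x (by simp) h) (fun st y hy => hstep st y (by simp [hy]))

theorem pv_mod_two_nonneg (s : Int) (_hs : 0 ≤ s) :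
    (PySem.Int.mod s 2 == 0) = (s % 2 == 0) := by
  rw [PySem.Int.mod_eq_emod_of_pos (by omega : (0:Int) < 2)]

-- B's fold = (A's fold, second-loop fold)
theorem pv_foldB_eq (ps : List (Int × Int)) :
    ∀ (p q : Int × Int) (s : Int),
      ps.foldl pvStepB (p, q, s) =
        ((ps.foldl pvStepA (p, q)).1, (ps.foldl pvStepA (p, q)).2, ps.foldl pvAlt2 s) := by
  induction ps with
  | nil => intro p q s; rfl
  | cons x t ih =>
    intro p q s
    simp only [List.foldl_cons, pvStepA, pvStepB, pvAlt2]
    split_ifs <;> exact ih _ _ _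

-- the second loop computes the alternating sum
theorem pv_fold_alt2 (l : List Int) :
    ∀ (s acc : Int), 0 ≤ s →
      (PySem.List.enumerate l s).foldl pvAlt2 acc =
        acc + (if s % 2 = 0 then pvAsum l else - pvAsum l) := by
  induction l with
  | nil => intro s acc _; simp [PySem.List.enumerate_nil, pvAsum]
  | cons a t ih =>
    intro s acc hs
    rw [PySem.List.enumerate_cons, List.foldl_cons, pvAlt2, pv_mod_two_nonneg s hs,
      ih (s + 1) _ (by omega)]
    have h2 : (s + 1) % 2 = 0 ↔ ¬ s % 2 = 0 := by omega
    by_cases h : s % 2 = 0 <;> simp [h, h2, pvAsum] <;> ring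

theorem pv_fold_alt2_zero (l : List Int) :
    (PySem.List.enumerate l).foldl pvAlt2 0 = pvAsum l := by
  rw [pv_fold_alt2 l 0 0 le_rfl]; simp

theorem pv_getD_set_self (l : List Int) (n : Nat) (x : Int) (h : n < l.length) :
    (l.set n x).getD n 0 = x := by
  rw [List.getD_eq_getElem _ _ (by simpa using h)]
  simp [List.getElem_set_self]

theorem pv_getD_set_ne (l : List Int) (m n : Nat) (x : Int) (h : m ≠ n) :
    (l.set m x).getD n 0 = l.getD n 0 := by
  simp [List.getD_eq_getElem?_getD, List.getElem?_set_ne h]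

theorem pv_asum_set (l : List Int) :
    ∀ (n : Nat) (x : Int), n < l.length →
      pvAsum (l.set n x) =
        pvAsum l + (if n % 2 = 0 then x - l.getD n 0 else l.getD n 0 - x) := by
  induction l with
  | nil => intro n x h; simp at h
  | cons a t ih =>
    intro n x h
    cases n with
    | zero => simp [pvAsum]
    | succ m =>
      have hm : m < t.length := by simpa using h
      have h2 : (m + 1) % 2 = 0 ↔ ¬ m % 2 = 0 := by omega
      simp only [List.set_cons_succ, pvAsum, List.getD_cons_succ, ih m x hm]
      by_cases hp : m % 2 = 0 <;> simp [hp, h2] <;> ring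

-- invariants of A's first loop
def pvInvP (arr : List Int) (p : Int × Int) : Prop :=
  ∃ k : Nat, k < arr.length ∧ k % 2 = 0 ∧ p = ((k : Int), arr.getD k 0)

def pvInvQ (arr : List Int) (mn : Int) (q : Int × Int) : Prop :=
  q = (0, mn) ∨ ∃ k : Nat, k < arr.length ∧ k % 2 = 1 ∧ q = ((k : Int), arr.getD k 0)

theorem pv_stepA_inv (arr : List Int) (mn : Int) (st : (Int × Int) × (Int × Int))
    (x : Int × Int) (hx : ∃ k : Nat, k < arr.length ∧ x = ((k : Int), arr.getD k 0))
    (h : pvInvP arr st.1 ∧ pvInvQ arr mn st.2) :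
    pvInvP arr (pvStepA st x).1 ∧ pvInvQ arr mn (pvStepA st x).2 := by
  obtain ⟨k, hk, hxk⟩ := hx
  unfold pvStepA
  rw [hxk]
  simp only [pv_mod_two_nonneg (k : Int) (by omega)]
  by_cases hp : (k : Int) % 2 = 0
  · have hke : k % 2 = 0 := by omega
    have hb : ((k : Int) % 2 == 0) = true := by simp [hp]
    simp only [hb, if_true]
    split_ifs with hlt
    · exact ⟨⟨k, hk, hke, rfl⟩, h.2⟩
    · exact h
  · have hko : k % 2 = 1 := by omega
    have hb : ((k : Int) % 2 == 0) = false := by simp [hp]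
    simp only [hb, Bool.false_eq_true, if_false]
    split_ifs with hgt
    · exact ⟨h.1, Or.inr ⟨k, hk, hko, rfl⟩⟩
    · exact h

theorem pv_foldA_inv (a : Int) (t : List Int) (mx mn : Int)
    (hmx : a ≤ mx) :
    pvInvP (a :: t) ((PySem.List.enumerate (a :: t)).foldl pvStepA ((0, mx), (0, mn))).1 ∧
    pvInvQ (a :: t) mn ((PySem.List.enumerate (a :: t)).foldl pvStepA ((0, mx), (0, mn))).2 := by
  rw [PySem.List.enumerate_cons, List.foldl_cons]
  have h0 : pvStepA ((0, mx), (0, mn)) (0, a) = ((0, a), (0, mn)) := by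
    unfold pvStepA
    by_cases hlt : a < mx <;> simp [hlt, PySem.Int.mod] <;> omega
  rw [h0]
  apply pv_foldl_inv (fun st => pvInvP (a :: t) st.1 ∧ pvInvQ (a :: t) mn st.2) pvStepA
  · exact ⟨⟨0, by simp, by simp, by simp⟩, Or.inl rfl⟩
  intro st x hx hst
  refine pv_stepA_inv (a :: t) mn st x ?_ hst
  rw [PySem.List.mem_enumerate_iff] at hx
  obtain ⟨k, hk, hxk⟩ := hx
  refine ⟨k + 1, by simpa using hk, ?_⟩
  rw [hxk]
  simp only [Prod.mk.injEq]
  constructor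
  · push_cast; ring
  · simp [List.getD_eq_getElem?_getD, List.getElem?_eq_getElem hk]

-- ===== VERDICT (by name: the statement is the Claim_ definition above) =====
theorem sum_arr_spec : Claim_equal_sum_arr := by
  intro arr _hdom hpre
  unfold Spec_sum_arr
  obtain ⟨a, t, rfl⟩ : ∃ a t, arr = a :: t := by
    cases arr with
    | nil => exact absurd rfl hpre
    | cons a t => exact ⟨a, t, rfl⟩
  unfold sum_arr sum_arr_alt
  rw [PySem.List.max?_id_cons, PySem.List.min?_id_cons]
  set arr := a :: t with harr
  set mx := t.foldl max a with hmxdef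
  set mn := t.foldl min a with hmndef
  have hamx : a ≤ mx := (PySem.List.le_foldl_max t a).1
  simp only []
  rw [pv_foldB_eq]
  have hA := pv_foldA_inv a t mx mn hamx
  set stA := (PySem.List.enumerate arr).foldl pvStepA ((0, mx), (0, mn)) with hstA
  obtain ⟨⟨i, hi, hie, hpA⟩, hQ⟩ := hA
  rw [hpA, pv_fold_alt2_zero, pv_fold_alt2_zero]
  rcases hQ with hq0 | ⟨j, hj, hjo, hqA⟩
  · -- max_negative never updated: swap of two even positions, delta 0
    rw [hq0]
    simp only [PySem.List.pyGetD_natCast, PySem.List.pyGetD_zero, Int.toNat_natCast,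
      Int.toNat_zero]
    have h0 : (0 : Nat) < arr.length := by rw [harr]; simp
    have hget0 : (arr.set i (arr.getD 0 0)).getD 0 0 = arr.getD 0 0 := by
      by_cases h : i = 0
      · subst h; exact pv_getD_set_self arr 0 _ h0
      · exact pv_getD_set_ne arr i 0 _ h
    have hlen0 : (0 : Nat) < (arr.set i (arr.getD 0 0)).length := by
      rw [List.length_set]; exact h0
    rw [pv_asum_set _ 0 _ hlen0, pv_asum_set arr i _ hi, hget0]
    simp [hie]
    ring
  · -- max_negative updated at odd j: delta 2*(arr[j] - arr[i])
    rw [hqA]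
    simp only [PySem.List.pyGetD_natCast, Int.toNat_natCast]
    have hij : i ≠ j := by omega
    have hjlen : j < (arr.set i (arr.getD j 0)).length := by
      rw [List.length_set]; exact hj
    have hjne : ¬ j % 2 = 0 := by omega
    have hj0 : (((j : Nat) : Int) == 0) = false := by
      simp only [beq_eq_false_iff_ne, ne_eq]
      intro h
      have : j = 0 := by exact_mod_cast h
      omega
    rw [pv_asum_set _ j _ hjlen, pv_asum_set arr i _ hi,
      pv_getD_set_ne arr i j _ hij, hj0]
    simp [hie, hjne]
    ring
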